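-- pv_equiv track=rewrite | github.com/huaqingji/programming-practice | algorithm_python/1133_Largest_Unique_Number.py | largestUniqueNumber
-- ===== SOURCE A (Python) =====
-- from typing import List
--
-- from collections import defaultdict
--
-- def largestUniqueNumber(nums: List[int]) -> int:
--
--     counter = defaultdict(int)
--     for num in nums:
--         counter[num] += 1
--
--     ans = -1
--     for num in counter:
--         if counter[num] == 1:
--             ans = max(ans, num)
--
--     return ans
-- ===== SOURCE B (Python) =====
-- def largestUniqueNumber(nums):
--     # sort a copy, then scan runs of equal values; unique values are runs of length 1
--     s = sorted(nums)
--     ans = -1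
--     i, n = 0, len(s)
--     while i < n:
--         j = i
--         while j < n and s[j] == s[i]:
--             j += 1
--         if j - i == 1:
--             ans = max(ans, s[i])
--         i = j
--     return ans
-- ===== Notes on version B (the rewrite author's own statement) =====
-- stated objective: alternative
-- what changed: B replaces the hash-map count table plus max-scan over keys with sort-then-run-scan: sort a copy ascending and walk runs of equal values, taking the max over runs of length exactly 1.
import Mathlib
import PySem

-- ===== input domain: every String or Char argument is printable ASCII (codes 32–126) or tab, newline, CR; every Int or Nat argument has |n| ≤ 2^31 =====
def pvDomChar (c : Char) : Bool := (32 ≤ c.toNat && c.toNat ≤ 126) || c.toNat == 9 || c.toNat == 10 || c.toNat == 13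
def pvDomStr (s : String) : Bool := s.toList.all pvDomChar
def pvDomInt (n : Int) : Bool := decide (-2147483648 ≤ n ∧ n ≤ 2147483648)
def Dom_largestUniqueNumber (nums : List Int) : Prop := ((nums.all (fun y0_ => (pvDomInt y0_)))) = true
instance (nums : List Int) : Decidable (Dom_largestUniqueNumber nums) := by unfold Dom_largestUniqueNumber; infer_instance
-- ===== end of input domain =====

-- B replaces A's hash-count-then-max-scan by sort-then-run-scan (alternative algorithm, same results).

-- ===== PORT A =====
-- counter = defaultdict(int); for num in nums: counter[num] += 1
-- ans = -1; for num in counter: if counter[num] == 1: ans = max(ans, num)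
def largestUniqueNumber (nums : List Int) : Int :=
  let counter : PySem.Dict Int Int :=
    nums.foldl (fun d num => d.modify num 0 (· + 1)) PySem.Dict.empty
  counter.keys.foldl (fun ans num => if counter.getD num 0 == 1 then max ans num else ans) (-1)

-- ===== PORT B =====
-- run-scan over the sorted copy: at each run head x, the inner while advances past the
-- run (takeWhile/dropWhile of elements equal to x); a run of length 1 updates ans.
def runScan (s : List Int) (ans : Int) : Int :=
  match s with
  | [] => ans
  | x :: rest =>
      let tail := rest.dropWhile (· == x)
      let ans' := if (rest.takeWhile (· == x)).length = 0 then max ans x else ans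
      runScan tail ans'
termination_by s.length
decreasing_by simp; exact List.length_dropWhile_le _ _

def largestUniqueNumber_alt (nums : List Int) : Int :=
  runScan (PySem.List.sorted nums (fun x => x) false) (-1)

-- ===== PRECONDITION & SPEC =====
def Spec_largestUniqueNumber (nums : List Int) (out : Int) : Prop := out = largestUniqueNumber_alt nums
instance (nums : List Int) (out : Int) : Decidable (Spec_largestUniqueNumber nums out) := by unfold Spec_largestUniqueNumber; infer_instance

-- ===== CLAIM (what is proved, stated in full; the proofs are below) =====
def Claim_equal_largestUniqueNumber : Prop := ∀ (nums : List Int), Dom_largestUniqueNumber nums → Spec_largestUniqueNumber nums (largestUniqueNumber nums)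

-- ===== LEMMAS AND PROOFS =====

-- heads of the length-1 runs, in order (mirrors runScan's recursion)
def uniqueHeads (s : List Int) : List Int :=
  match s with
  | [] => []
  | x :: rest =>
      let tail := rest.dropWhile (· == x)
      if (rest.takeWhile (· == x)).length = 0 then x :: uniqueHeads tail else uniqueHeads tail
termination_by s.length
decreasing_by all_goals (simp; exact List.length_dropWhile_le _ _)

-- a fold with an if-guard is a fold over the filtered list
theorem foldl_if_filter (p : Int → Bool) (l : List Int) (i : Int) :
    l.foldl (fun a v => if p v then max a v else a) i = (l.filter p).foldl max i := by
  induction l generalizing i with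
  | nil => rfl
  | cons x t ih => by_cases h : p x <;> simp [List.foldl_cons, h, ih]

theorem runScan_eq_foldl (s : List Int) (ans : Int) :
    runScan s ans = (uniqueHeads s).foldl max ans := by
  induction s using uniqueHeads.induct generalizing ans with
  | case1 => simp [runScan.eq_def, uniqueHeads.eq_def]
  | case2 x rest tail h ih =>
      rw [runScan.eq_def, uniqueHeads.eq_def]
      simp only [h, if_pos]
      exact ih _
  | case3 x rest tail h ih =>
      rw [runScan.eq_def, uniqueHeads.eq_def]
      simp only [h]
      exact ih _

theorem mem_uniqueHeads_sub (s : List Int) (v : Int) (h : v ∈ uniqueHeads s) : v ∈ s := by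
  induction s using uniqueHeads.induct with
  | case1 => simp [uniqueHeads.eq_def] at h
  | case2 x rest tail hl ih =>
      rw [uniqueHeads.eq_def] at h; simp only [hl, if_pos] at h
      rcases List.mem_cons.mp h with h | h
      · simp [h]
      · exact List.mem_cons_of_mem _ ((rest.dropWhile_sublist (p := (· == x))).mem (ih h))
  | case3 x rest tail hl ih =>
      rw [uniqueHeads.eq_def] at h; simp only [hl] at h
      exact List.mem_cons_of_mem _ ((rest.dropWhile_sublist (p := (· == x))).mem (ih h))

-- structure of a sorted cons: the takeWhile part is all x, the dropWhile part is all > x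
theorem sorted_cons_split (x : Int) (rest : List Int)
    (hp : (x :: rest).Pairwise (· ≤ ·)) :
    (∀ y ∈ rest.takeWhile (· == x), y = x) ∧
    (∀ y ∈ rest.dropWhile (· == x), x < y) ∧
    (rest.dropWhile (· == x)).Pairwise (· ≤ ·) := by
  have hr : rest.Pairwise (· ≤ ·) := (List.pairwise_cons.mp hp).2
  have hge : ∀ y ∈ rest, x ≤ y := (List.pairwise_cons.mp hp).1
  refine ⟨fun y hy => by simpa using List.mem_takeWhile_imp hy, ?_, ?_⟩
  · intro y hy
    have hyr : y ∈ rest := (rest.dropWhile_sublist (p := (· == x))).mem hy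
    have hxy : x ≤ y := hge y hyr
    rcases lt_or_eq_of_le hxy with h | h
    · exact h
    · exfalso
      -- y = x lies in dropWhile: its head h0 satisfies ¬(h0 == x) and h0 ≤ y
      cases hd : rest.dropWhile (· == x) with
      | nil => rw [hd] at hy; simp at hy
      | cons h0 t =>
          have hh0 : ¬ (h0 == x) = true := by
            have := List.head_dropWhile_not (· == x) (l := rest) (by simp [hd])
            simpa [hd] using this
          have hh0x : h0 ≠ x := by simpa using hh0
          have hh0r : h0 ∈ rest := (rest.dropWhile_sublist (p := (· == x))).mem (by simp [hd])
          have hxh0 : x ≤ h0 := hge h0 hh0r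
          have hpd : (h0 :: t).Pairwise (· ≤ ·) := hd ▸ hr.sublist (rest.dropWhile_sublist _)
          rw [hd] at hy
          rcases List.mem_cons.mp hy with h1 | h1
          · exact hh0x (h1 ▸ h.symm)
          · have : h0 ≤ y := (List.pairwise_cons.mp hpd).1 y h1
            have : h0 ≤ x := h ▸ this
            exact hh0x (le_antisymm this hxh0)
  · exact hr.sublist (rest.dropWhile_sublist _)

-- membership in uniqueHeads of a sorted list = count 1
theorem mem_uniqueHeads_iff (s : List Int) (hp : s.Pairwise (· ≤ ·)) (v : Int) :
    v ∈ uniqueHeads s ↔ s.count v = 1 := by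
  induction s using uniqueHeads.induct with
  | case1 => simp [uniqueHeads.eq_def]
  | case2 x rest tail hl ih =>
      obtain ⟨ht, hd, hpd⟩ := sorted_cons_split x rest hp
      have htw : rest.takeWhile (· == x) = [] := List.length_eq_zero_iff.mp hl
      have hsplit : rest = rest.dropWhile (· == x) := by
        conv_lhs => rw [← List.takeWhile_append_dropWhile (p := (· == x)) (l := rest)]
        rw [htw]; rfl
      have hxnd : x ∉ rest := by
        intro hx; exact absurd (hd x (hsplit ▸ hx)) (lt_irrefl x)
      rw [uniqueHeads.eq_def]; simp only [hl, if_pos]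
      by_cases hv : v = x
      · subst hv
        have : v ∉ uniqueHeads tail := fun h => hxnd (hsplit ▸ mem_uniqueHeads_sub _ _ h)
        simp [List.count_eq_zero_of_not_mem hxnd]
      · have hct : tail.count v = rest.count v := by
          rw [show tail = rest.dropWhile (· == x) from rfl, ← hsplit]
        rw [List.mem_cons, List.count_cons]
        simp only [hv, false_or]
        rw [ih hpd, hct]
        simp [Ne.symm hv]
  | case3 x rest tail hl ih =>
      obtain ⟨ht, hd, hpd⟩ := sorted_cons_split x rest hp
      have hxnd : x ∉ tail := fun hx => absurd (hd x hx) (lt_irrefl x)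
      have hcnt_t : (rest.takeWhile (· == x)).count x = (rest.takeWhile (· == x)).length :=
        List.count_eq_length.mpr (fun y hy => by simp [ht y hy])
      rw [uniqueHeads.eq_def]; simp only [hl]
      by_cases hv : v = x
      · subst hv
        have hno : v ∉ uniqueHeads tail := fun h => hxnd (mem_uniqueHeads_sub _ _ h)
        have h1 : rest.count v = (rest.takeWhile (· == v)).count v + tail.count v := by
          conv_lhs => rw [← List.takeWhile_append_dropWhile (p := (· == v)) (l := rest)]
          rw [List.count_append]
        have hc : (v :: rest).count v = 1 + (rest.takeWhile (· == v)).length := by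
          rw [List.count_cons_self, h1, hcnt_t, List.count_eq_zero_of_not_mem hxnd]
          omega
        refine iff_of_false hno ?_
        rw [hc]; omega
      · have hvt : v ∉ rest.takeWhile (· == x) := fun h => hv (ht v h)
        have h1 : rest.count v = (rest.takeWhile (· == x)).count v + tail.count v := by
          conv_lhs => rw [← List.takeWhile_append_dropWhile (p := (· == x)) (l := rest)]
          rw [List.count_append]
        have hc : (x :: rest).count v = tail.count v := by
          rw [List.count_cons_of_ne (Ne.symm hv), h1, List.count_eq_zero_of_not_mem hvt, Nat.zero_add]
        rw [hc]
        exact ih hpd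

theorem nodup_uniqueHeads (s : List Int) (hp : s.Pairwise (· ≤ ·)) :
    (uniqueHeads s).Nodup := by
  induction s using uniqueHeads.induct with
  | case1 => simp [uniqueHeads.eq_def]
  | case2 x rest tail hl ih =>
      obtain ⟨ht, hd, hpd⟩ := sorted_cons_split x rest hp
      have hxnd : x ∉ tail := fun hx => absurd (hd x hx) (lt_irrefl x)
      rw [uniqueHeads.eq_def]; simp only [hl, if_pos]
      exact List.nodup_cons.mpr ⟨fun h => hxnd (mem_uniqueHeads_sub _ _ h), ih hpd⟩
  | case3 x rest tail hl ih =>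
      obtain ⟨ht, hd, hpd⟩ := sorted_cons_split x rest hp
      rw [uniqueHeads.eq_def]; simp only [hl]
      exact ih hpd

-- ===== VERDICT (by name: the statement is the Claim_ definition above) =====
theorem largestUniqueNumber_spec : Claim_equal_largestUniqueNumber := by
  intro nums _
  unfold Spec_largestUniqueNumber largestUniqueNumber largestUniqueNumber_alt
  -- A side: counter-fold = PySem counter; keys = ofList; getD = count
  rw [show nums.foldl (fun d num => d.modify num 0 (· + 1)) PySem.Dict.empty
        = PySem.Dict.counter nums from (PySem.Dict.counter_eq_foldl nums).symm]
  simp only [PySem.Dict.keys_counter, PySem.Dict.getD_counter]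
  rw [foldl_if_filter]
  -- B side
  set s := PySem.List.sorted nums (fun x => x) false with hs
  have hpair : s.Pairwise (· ≤ ·) := PySem.List.sorted_pairwise nums (fun x => x)
  have hperm : s.Perm nums := PySem.List.sorted_perm nums (fun x => x) false
  rw [runScan_eq_foldl]
  -- the two folded lists are permutations of each other
  have hA_nodup : ((PySem.Set.ofList nums).filter (fun v => (((nums.count v : Int) == 1) : Bool))).Nodup :=
    (PySem.Set.nodup_ofList nums).filter _
  have hB_nodup := nodup_uniqueHeads s hpair
  have hmem : ∀ v, v ∈ uniqueHeads s ↔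
      v ∈ (PySem.Set.ofList nums).filter (fun v => (((nums.count v : Int) == 1) : Bool)) := by
    intro v
    rw [mem_uniqueHeads_iff s hpair v, List.mem_filter, PySem.Set.mem_ofList, hperm.count_eq]
    constructor
    · intro h
      refine ⟨List.count_pos_iff.mp (by omega), by simp [h]⟩
    · rintro ⟨-, h⟩
      simp only [beq_iff_eq] at h
      exact_mod_cast h
  have hperm2 : (uniqueHeads s).Perm
      ((PySem.Set.ofList nums).filter (fun v => (((nums.count v : Int) == 1) : Bool))) :=
    (List.perm_ext_iff_of_nodup hB_nodup hA_nodup).mpr hmem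
  exact (hperm2.foldl_eq' (fun x _ y _ z => max_right_comm z x y) (-1)).symm
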